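-- pv_equiv track=rewrite | github.com/rowancape/ubongo3D_solver | main.py | rotateY
-- ===== SOURCE A (Python) =====
-- def rotateY(object, rotations=1):
--     rotations = rotations % 4
--
--     for _ in range(rotations):
--         layers = len(object)
--         rows = len(object[0])
--         points = len(object[0][0])
--
--         rotatedObject = [
--             [[object[layers - 1 - k][j][i] for k in range(layers)] for j in range(rows)]
--             for i in range(points)
--         ]
--         object = rotatedObject
--
--     return object
-- ===== SOURCE B (Python) =====
-- # Rotate a 3D voxel grid around Y: compute r = rotations % 4 once and build the
-- # result in a single pass with the direct index formula for that quarter-turn,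
-- # instead of rebuilding the whole grid r times.
-- def rotateY(object, rotations=1):
--     r = rotations % 4
--     if r == 0:
--         return object
--     L = len(object)
--     R = len(object[0])
--     P = len(object[0][0])
--     if r == 1:
--         return [[[object[L - 1 - k][j][i] for k in range(L)] for j in range(R)]
--                 for i in range(P)]
--     if r == 2:
--         return [[[object[L - 1 - a][b][P - 1 - c] for c in range(P)] for b in range(R)]
--                 for a in range(L)]
--     return [[[object[c][b][P - 1 - a] for c in range(L)] for b in range(R)]
--             for a in range(P)]
-- ===== Notes on version B (the rewrite author's own statement) =====
-- stated objective: alternative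
-- what changed: B computes rotations % 4 once and builds the rotated grid in a single pass using the direct index formula for that quarter-turn count (identity / 90 / 180 / 270), instead of rebuilding the full grid once per iteration of a rotation loop.
import Mathlib
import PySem

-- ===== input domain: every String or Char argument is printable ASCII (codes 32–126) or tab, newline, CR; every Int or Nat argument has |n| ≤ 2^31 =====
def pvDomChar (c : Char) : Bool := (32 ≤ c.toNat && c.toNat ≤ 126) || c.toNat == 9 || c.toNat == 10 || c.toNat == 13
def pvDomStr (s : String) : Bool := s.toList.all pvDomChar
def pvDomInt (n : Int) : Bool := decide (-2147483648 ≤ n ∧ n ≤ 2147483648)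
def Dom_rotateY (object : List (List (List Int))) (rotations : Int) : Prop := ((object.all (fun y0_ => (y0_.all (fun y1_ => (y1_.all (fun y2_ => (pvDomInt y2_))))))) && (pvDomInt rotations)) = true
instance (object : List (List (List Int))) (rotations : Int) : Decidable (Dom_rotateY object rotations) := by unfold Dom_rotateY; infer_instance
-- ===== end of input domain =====

-- B builds the rotated grid in one pass from the direct index formula for rotations % 4,
-- instead of A's loop that rebuilds the full grid once per quarter-turn.

-- ===== PORT A =====
-- loop body of A: one 90-degree rotation (indexing ported with pyGetD; the out-of-range
-- reads where Python would raise IndexError are excluded by Pre_rotateY)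
def pvRot90 (g : List (List (List Int))) : List (List (List Int)) :=
  let layers : Int := PySem.List.len g
  let rows : Int := PySem.List.len (PySem.List.pyGetD g 0 [])
  let points : Int := PySem.List.len (PySem.List.pyGetD (PySem.List.pyGetD g 0 []) 0 [])
  (PySem.List.pyRange 0 points 1).map (fun i =>
    (PySem.List.pyRange 0 rows 1).map (fun j =>
      (PySem.List.pyRange 0 layers 1).map (fun k =>
        PySem.List.pyGetD (PySem.List.pyGetD (PySem.List.pyGetD g (layers - 1 - k) []) j []) i 0)))

def rotateY (object : List (List (List Int))) (rotations : Int) : List (List (List Int)) :=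
  (PySem.List.pyRange 0 (PySem.Int.mod rotations 4) 1).foldl (fun g _ => pvRot90 g) object

-- ===== PORT B =====
def rotateY_alt (object : List (List (List Int))) (rotations : Int) : List (List (List Int)) :=
  let r : Int := PySem.Int.mod rotations 4
  if r = 0 then object
  else
    let L : Int := PySem.List.len object
    let R : Int := PySem.List.len (PySem.List.pyGetD object 0 [])
    let P : Int := PySem.List.len (PySem.List.pyGetD (PySem.List.pyGetD object 0 []) 0 [])
    if r = 1 then
      (PySem.List.pyRange 0 P 1).map (fun i =>
        (PySem.List.pyRange 0 R 1).map (fun j =>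
          (PySem.List.pyRange 0 L 1).map (fun k =>
            PySem.List.pyGetD (PySem.List.pyGetD (PySem.List.pyGetD object (L - 1 - k) []) j []) i 0)))
    else if r = 2 then
      (PySem.List.pyRange 0 L 1).map (fun a =>
        (PySem.List.pyRange 0 R 1).map (fun b =>
          (PySem.List.pyRange 0 P 1).map (fun c =>
            PySem.List.pyGetD (PySem.List.pyGetD (PySem.List.pyGetD object (L - 1 - a) []) b []) (P - 1 - c) 0)))
    else
      (PySem.List.pyRange 0 P 1).map (fun a =>
        (PySem.List.pyRange 0 R 1).map (fun b =>
          (PySem.List.pyRange 0 L 1).map (fun c =>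
            PySem.List.pyGetD (PySem.List.pyGetD (PySem.List.pyGetD object c []) b []) (P - 1 - a) 0)))

-- ===== PRECONDITION & SPEC =====
-- Pre_ is exactly the set of inputs on which the Python A returns: either a no-op rotation
-- count, or a grid whose first layer and first row are nonempty and whose layers all cover
-- the R x P index window A reads (otherwise A raises IndexError; points = 0 is only survived
-- by a single rotation, since A's intermediate grid becomes empty and the second iteration raises).
def Pre_rotateY (object : List (List (List Int))) (rotations : Int) : Prop :=
  PySem.Int.mod rotations 4 = 0 ∨
    (object ≠ [] ∧
     0 < PySem.List.len (PySem.List.pyGetD object 0 []) ∧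
     (PySem.List.len (PySem.List.pyGetD (PySem.List.pyGetD object 0 []) 0 []) = 0 →
        PySem.Int.mod rotations 4 = 1) ∧
     (0 < PySem.List.len (PySem.List.pyGetD (PySem.List.pyGetD object 0 []) 0 []) →
        ∀ layer ∈ object,
          PySem.List.len (PySem.List.pyGetD object 0 []) ≤ PySem.List.len layer ∧
          ∀ row ∈ layer.take (PySem.List.len (PySem.List.pyGetD object 0 [])).toNat,
            PySem.List.len (PySem.List.pyGetD (PySem.List.pyGetD object 0 []) 0 []) ≤ PySem.List.len row))
instance (object : List (List (List Int))) (rotations : Int) : Decidable (Pre_rotateY object rotations) := by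
  unfold Pre_rotateY; infer_instance

def pvWitness_rotateY : List (List (List Int)) × Int := ([[[1, 2], [3, 4]], [[5, 6], [7, 8]]], 3)

def Spec_rotateY (object : List (List (List Int))) (rotations : Int) (out : List (List (List Int))) : Prop := out = rotateY_alt object rotations
instance (object : List (List (List Int))) (rotations : Int) (out : List (List (List Int))) : Decidable (Spec_rotateY object rotations out) := by unfold Spec_rotateY; infer_instance

-- ===== CLAIM (what is proved, stated in full; the proofs are below) =====
def Claim_equal_rotateY : Prop := ∀ (object : List (List (List Int))) (rotations : Int), Dom_rotateY object rotations → Pre_rotateY object rotations → Spec_rotateY object rotations (rotateY object rotations)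
-- ===== LEMMAS AND PROOFS =====

-- a rectangular grid of dimensions A x B x C with entry function f
def pvMk (A B C : Int) (f : Int → Int → Int → Int) : List (List (List Int)) :=
  (PySem.List.pyRange 0 A 1).map (fun a =>
    (PySem.List.pyRange 0 B 1).map (fun b =>
      (PySem.List.pyRange 0 C 1).map (fun c => f a b c)))

lemma pvMk_congr (A B C : Int) (f f' : Int → Int → Int → Int)
    (h : ∀ a b c, f a b c = f' a b c) : pvMk A B C f = pvMk A B C f' := by
  have hf : f = f' := funext fun a => funext fun b => funext fun c => h a b c
  rw [hf]

-- one 90-degree rotation of a rectangular grid, in entry-function form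
lemma pvRot90_mk (A B C : Int) (f : Int → Int → Int → Int)
    (hA : 0 < A) (hB : 0 < B) (hC : 0 ≤ C) :
    pvRot90 (pvMk A B C f) = pvMk C B A (fun i j k => f (A - 1 - k) j i) := by
  have hrow0 :
      PySem.List.pyGetD (pvMk A B C f) 0 [] =
        (PySem.List.pyRange 0 B 1).map (fun b =>
          (PySem.List.pyRange 0 C 1).map (fun c => f 0 b c)) := by
    unfold pvMk
    exact PySem.List.pyGetD_map_pyRange_of_nonneg _ A 0 _ le_rfl hA
  have hpt0 :
      PySem.List.pyGetD (PySem.List.pyGetD (pvMk A B C f) 0 []) 0 [] =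
        (PySem.List.pyRange 0 C 1).map (fun c => f 0 0 c) := by
    rw [hrow0]
    exact PySem.List.pyGetD_map_pyRange_of_nonneg _ B 0 _ le_rfl hB
  show
    (PySem.List.pyRange 0 (PySem.List.len (PySem.List.pyGetD (PySem.List.pyGetD (pvMk A B C f) 0 []) 0 [])) 1).map _ = _
  rw [hpt0]
  have hlenC : PySem.List.len ((PySem.List.pyRange 0 C 1).map (fun c => f 0 0 c)) = C := by
    simp [PySem.List.len_eq, PySem.List.length_pyRange_one]; omega
  have hlenB : PySem.List.len (PySem.List.pyGetD (pvMk A B C f) 0 []) = B := by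
    rw [hrow0]; simp [PySem.List.len_eq, PySem.List.length_pyRange_one]; omega
  have hlenA : PySem.List.len (pvMk A B C f) = A := by
    unfold pvMk; simp [PySem.List.len_eq, PySem.List.length_pyRange_one]; omega
  rw [hlenC, hlenB, hlenA]
  unfold pvMk
  refine List.map_congr_left (fun i hi => ?_)
  refine List.map_congr_left (fun j hj => ?_)
  refine List.map_congr_left (fun k hk => ?_)
  rw [PySem.List.mem_pyRange_one] at hi hj hk
  rw [PySem.List.pyGetD_map_pyRange_of_nonneg _ A (A - 1 - k) _ (by omega) (by omega)]
  rw [PySem.List.pyGetD_map_pyRange_of_nonneg _ B j _ (by omega) (by omega)]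
  rw [PySem.List.pyGetD_map_pyRange_of_nonneg _ C i _ (by omega) (by omega)]

-- the raw first rotation IS a pvMk grid over the window A reads (definitional)
lemma pvRot90_eq_mk (g : List (List (List Int))) :
    pvRot90 g =
      pvMk (PySem.List.len (PySem.List.pyGetD (PySem.List.pyGetD g 0 []) 0 []))
           (PySem.List.len (PySem.List.pyGetD g 0 []))
           (PySem.List.len g)
           (fun i j k =>
             PySem.List.pyGetD (PySem.List.pyGetD (PySem.List.pyGetD g (PySem.List.len g - 1 - k) []) j []) i 0) := rfl

lemma pvLen_nonneg {α : Type} (g : List α) : 0 ≤ PySem.List.len g := by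
  simp [PySem.List.len_eq]

lemma pvLen_pos {α : Type} (g : List α) (h : g ≠ []) : 0 < PySem.List.len g := by
  simp [PySem.List.len_eq]
  exact List.length_pos_iff.mpr h

-- ===== VERDICT (by name: the statement is the Claim_ definition above) =====
theorem rotateY_spec : Claim_equal_rotateY := by
  intro object rotations _ hpre
  unfold Spec_rotateY
  have h0 : 0 ≤ PySem.Int.mod rotations 4 := PySem.Int.mod_nonneg rotations (by norm_num)
  have h4 : PySem.Int.mod rotations 4 < 4 := PySem.Int.mod_lt rotations (by norm_num)
  have hcases : PySem.Int.mod rotations 4 = 0 ∨ PySem.Int.mod rotations 4 = 1 ∨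
      PySem.Int.mod rotations 4 = 2 ∨ PySem.Int.mod rotations 4 = 3 := by omega
  rcases hcases with hr | hr | hr | hr
  · -- r = 0 : both return the object unchanged
    unfold rotateY rotateY_alt
    rw [hr, PySem.List.pyRange_one_eq_nil le_rfl]
    simp
  · -- r = 1 : A does one rotation; B's r = 1 branch is the same comprehension
    unfold rotateY rotateY_alt
    rw [hr, show PySem.List.pyRange 0 1 1 = [0] from by decide]
    simp only [List.foldl]
    split_ifs with h1
    · norm_num at h1
    · rfl
  · -- r = 2 : two rotations of A collapse to B's direct 180-degree formula
    rcases hpre with hpre | ⟨hne, hR, hP0, _⟩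
    · omega
    have hP : 0 < PySem.List.len (PySem.List.pyGetD (PySem.List.pyGetD object 0 []) 0 []) := by
      rcases (pvLen_nonneg (PySem.List.pyGetD (PySem.List.pyGetD object 0 []) 0 [])).lt_or_eq with h | h
      · exact h
      · exact absurd (hP0 h.symm) (by omega)
    unfold rotateY rotateY_alt
    rw [hr, show PySem.List.pyRange 0 2 1 = [0, 1] from by decide]
    simp only [List.foldl]
    split_ifs with h1 h2
    · norm_num at h1
    · norm_num at h2
    rw [pvRot90_eq_mk object, pvRot90_mk _ _ _ _ hP hR (pvLen_nonneg object)]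
    rfl
  · -- r = 3 : three rotations of A collapse to B's direct 270-degree formula
    rcases hpre with hpre | ⟨hne, hR, hP0, _⟩
    · omega
    have hP : 0 < PySem.List.len (PySem.List.pyGetD (PySem.List.pyGetD object 0 []) 0 []) := by
      rcases (pvLen_nonneg (PySem.List.pyGetD (PySem.List.pyGetD object 0 []) 0 [])).lt_or_eq with h | h
      · exact h
      · exact absurd (hP0 h.symm) (by omega)
    have hL : 0 < PySem.List.len object := pvLen_pos object hne
    unfold rotateY rotateY_alt
    rw [hr, show PySem.List.pyRange 0 3 1 = [0, 1, 2] from by decide]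
    simp only [List.foldl]
    split_ifs with h1 h2 h3
    · norm_num at h1
    · norm_num at h2
    · norm_num at h3
    rw [pvRot90_eq_mk object, pvRot90_mk _ _ _ _ hP hR (pvLen_nonneg object),
        pvRot90_mk _ _ _ _ hL hR (le_of_lt hP)]
    have hcg :
        pvMk (PySem.List.len (PySem.List.pyGetD (PySem.List.pyGetD object 0 []) 0 []))
             (PySem.List.len (PySem.List.pyGetD object 0 []))
             (PySem.List.len object)
             (fun i j k =>
               PySem.List.pyGetD
                 (PySem.List.pyGetD
                   (PySem.List.pyGetD object
                     (PySem.List.len object - 1 - (PySem.List.len object - 1 - k)) []) j [])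
                 (PySem.List.len (PySem.List.pyGetD (PySem.List.pyGetD object 0 []) 0 []) - 1 - i) 0) =
        pvMk (PySem.List.len (PySem.List.pyGetD (PySem.List.pyGetD object 0 []) 0 []))
             (PySem.List.len (PySem.List.pyGetD object 0 []))
             (PySem.List.len object)
             (fun i j k =>
               PySem.List.pyGetD (PySem.List.pyGetD (PySem.List.pyGetD object k []) j [])
                 (PySem.List.len (PySem.List.pyGetD (PySem.List.pyGetD object 0 []) 0 []) - 1 - i) 0) := by
      refine pvMk_congr _ _ _ _ _ (fun i j k => ?_)
      rw [show PySem.List.len object - 1 - (PySem.List.len object - 1 - k) = k from by ring]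
    rw [hcg]
    rfl
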